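-- pv_equiv track=rewrite | github.com/AbbiePBC/advent_of_code_2023 | one.py | part_two_parse_line
-- ===== SOURCE A (Python) =====
-- def numeric_word(line: str, idx: int) -> int:
--     words = ["one", "two", "three", "four", "five", "six", "seven", "eight", "nine"]
--     for w in range(len(words)):
--         if line[idx:].startswith(words[w]):
--             return w + 1 # 1-indexed
--     return -1
--
-- def part_two_parse_line(line: str) -> int:
--
--     for i in range(len(line)):
--         if line[i].isnumeric():
--             first_digit = line[i]
--             break
--         digit = numeric_word(line, i)
--         if digit != -1:
--             first_digit = digit
--             break
--
--     for i in range(len(line)-1, -1, -1):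
--         if line[i].isnumeric():
--             last_digit = line[i]
--             break
--         digit = numeric_word(line, i)
--         if digit != -1:
--             last_digit = digit
--             break
--
--     return int(first_digit)*10 + int(last_digit)
-- ===== SOURCE B (Python) =====
-- def part_two_parse_line(line: str) -> int:
--     words = {"one": 1, "two": 2, "three": 3, "four": 4, "five": 5,
--              "six": 6, "seven": 7, "eight": 8, "nine": 9}
--     matches = []
--     for i in range(len(line)):
--         ch = line[i]
--         if ch.isnumeric():
--             matches.append(int(ch))
--         else:
--             for w, v in words.items():
--                 if line.startswith(w, i):
--                     matches.append(v)
--                     break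
--     return matches[0] * 10 + matches[-1]
-- ===== Notes on version B (the rewrite author's own statement) =====
-- stated objective: alternative
-- what changed: A's two early-breaking directed scans (forward for the first digit, backward for the last) are replaced by one forward collect-all pass that appends every digit/word match to a list, backed by a word->value dict, returning matches[0]*10 + matches[-1]; on lines with no match both raise (A UnboundLocalError, B IndexError), excluded by Pre_.
import Mathlib
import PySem

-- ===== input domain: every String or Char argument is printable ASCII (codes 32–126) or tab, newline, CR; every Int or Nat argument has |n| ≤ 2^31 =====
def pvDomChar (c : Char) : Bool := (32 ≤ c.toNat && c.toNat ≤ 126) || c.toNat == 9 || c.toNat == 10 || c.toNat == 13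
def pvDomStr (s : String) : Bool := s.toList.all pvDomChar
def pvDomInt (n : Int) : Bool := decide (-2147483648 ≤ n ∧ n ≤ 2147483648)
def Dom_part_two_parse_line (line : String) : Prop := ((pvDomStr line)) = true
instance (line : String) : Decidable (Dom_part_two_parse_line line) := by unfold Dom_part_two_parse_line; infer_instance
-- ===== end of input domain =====

-- B replaces A's two early-breaking directed scans by one collect-all pass plus
-- endpoint selection (matches[0], matches[-1]); objective: alternative decomposition.

-- shared primitives (exact on the ASCII domain):
-- ch.isnumeric() — on printable ASCII it is str.isdigit of the one-char string
def pyIsnumeric (c : Char) : Bool := PySem.Chars.strIsdigit [c]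
-- int(ch) for a one-char string; the default is unreachable (only applied to digit chars)
def pyIntOfChar (c : Char) : Int := (PySem.Int.ofChars? [c]).getD 0

-- ===== PORT A =====
def wordsA : List (List Char) :=
  [['o','n','e'], ['t','w','o'], ['t','h','r','e','e'], ['f','o','u','r'], ['f','i','v','e'],
   ['s','i','x'], ['s','e','v','e','n'], ['e','i','g','h','t'], ['n','i','n','e']]

-- the 'for w in range(len(words))' loop of numeric_word; k is w+1
def nwGo (s : List Char) : List (List Char) → Int → Int
  | [], _ => -1
  | w :: ws, k => if PySem.Chars.startswith s w then k else nwGo s ws (k + 1)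

-- numeric_word(line, idx): line[idx:] with 0 ≤ idx is List.drop
def numeric_word (line : List Char) (idx : Nat) : Int := nwGo (line.drop idx) wordsA 1

-- first loop: forward scan with break, on the suffix line[i:]
def scanF : List Char → Option Int
  | [] => none
  | c :: rest =>
    if pyIsnumeric c then some (pyIntOfChar c)
    else
      let d := numeric_word (c :: rest) 0
      if d ≠ -1 then some d else scanF rest

-- second loop: 'for i in range(len(line)-1, -1, -1)'; argument is i+1, index read is i (always in range)
def scanB (cs : List Char) : Nat → Option Int
  | 0 => none
  | i + 1 =>
    let c := cs.getD i ' '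
    if pyIsnumeric c then some (pyIntOfChar c)
    else
      let d := numeric_word cs i
      if d ≠ -1 then some d else scanB cs i

-- the .getD 0 defaults are unreachable under Pre_ (there Python raises UnboundLocalError)
def part_two_parse_line (line : String) : Int :=
  let cs := line.toList
  (scanF cs).getD 0 * 10 + (scanB cs cs.length).getD 0

-- ===== PORT B =====
def itemsB : List (List Char × Int) :=
  [(['o','n','e'],1), (['t','w','o'],2), (['t','h','r','e','e'],3), (['f','o','u','r'],4),
   (['f','i','v','e'],5), (['s','i','x'],6), (['s','e','v','e','n'],7), (['e','i','g','h','t'],8),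
   (['n','i','n','e'],9)]

-- inner 'for w, v in words.items()' with break; line.startswith(w, i) is startswith on line[i:]
def wordAtB (s : List Char) : List (List Char × Int) → Option Int
  | [] => none
  | (w, v) :: ws => if PySem.Chars.startswith s w then some v else wordAtB s ws

-- the collecting loop over i, recursion on the suffix line[i:]
def goB : List Char → List Int
  | [] => []
  | c :: rest =>
    (if pyIsnumeric c then [pyIntOfChar c]
     else match wordAtB (c :: rest) itemsB with
          | some v => [v]
          | none => []) ++ goB rest

-- matches[0] and matches[-1]; defaults unreachable under Pre_ (there Python raises IndexError)
def part_two_parse_line_alt (line : String) : Int :=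
  let ms := goB line.toList
  PySem.List.pyGetD ms 0 0 * 10 + PySem.List.pyGetD ms (-1) 0

-- ===== PRECONDITION & SPEC =====
-- Pre_: some position holds an ASCII digit or starts a spelled-out digit word; on all other
-- lines A raises UnboundLocalError (and B raises IndexError), so they are excluded.
def Pre_part_two_parse_line (line : String) : Prop :=
  ∃ i < line.toList.length,
    pyIsnumeric (line.toList.getD i ' ') = true ∨
    ∃ w ∈ wordsA, w <+: line.toList.drop i
instance (line : String) : Decidable (Pre_part_two_parse_line line) := by
  unfold Pre_part_two_parse_line; infer_instance

def pvWitness_part_two_parse_line : String := "xtwo5y"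

def Spec_part_two_parse_line (line : String) (out : Int) : Prop := out = part_two_parse_line_alt line
instance (line : String) (out : Int) : Decidable (Spec_part_two_parse_line line out) := by unfold Spec_part_two_parse_line; infer_instance

-- ===== CLAIM (what is proved, stated in full; the proofs are below) =====
def Claim_equal_part_two_parse_line : Prop := ∀ (line : String), Dom_part_two_parse_line line → Pre_part_two_parse_line line → Spec_part_two_parse_line line (part_two_parse_line line)

-- ===== LEMMAS AND PROOFS =====

-- itemsB pairs each word with the 1-based position A's counter assigns it
def aligned : List (List Char × Int) → Int → Prop
  | [], _ => True
  | (_, v) :: ps, k => v = k ∧ aligned ps (k + 1)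

theorem wordAtB_eq_nwGo (s : List Char) :
    ∀ (ps : List (List Char × Int)) (k : Int), aligned ps k → 0 < k →
      wordAtB s ps = if nwGo s (ps.map Prod.fst) k = -1 then none
                     else some (nwGo s (ps.map Prod.fst) k) := by
  intro ps
  induction ps with
  | nil => intro k _ _; rfl
  | cons p rest ih =>
    intro k hal hk
    obtain ⟨w, v⟩ := p
    obtain ⟨hv, hrest⟩ := hal
    subst hv
    simp only [wordAtB, List.map_cons, nwGo]
    by_cases hs : PySem.Chars.startswith s w = true
    · rw [if_pos hs, if_pos hs, if_neg (by omega : ¬ (v : Int) = -1)]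
    · rw [if_neg hs, if_neg hs]
      exact ih (v + 1) hrest (by omega)

theorem nw_eq (s : List Char) :
    wordAtB s itemsB = if nwGo s wordsA 1 = -1 then none else some (nwGo s wordsA 1) := by
  have h := wordAtB_eq_nwGo s itemsB 1 (by simp [aligned, itemsB]) (by norm_num)
  have hm : itemsB.map Prod.fst = wordsA := by rfl
  rwa [hm] at h

-- the match produced at one position (proof-only helper)
def matchAt (cs : List Char) (i : Nat) : Option Int :=
  if pyIsnumeric (cs.getD i ' ') then some (pyIntOfChar (cs.getD i ' '))
  else wordAtB (cs.drop i) itemsB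

theorem matchAt_succ (c : Char) (rest : List Char) (i : Nat) :
    matchAt (c :: rest) (i + 1) = matchAt rest i := by
  simp [matchAt]

theorem matchAt_zero (c : Char) (rest : List Char) :
    matchAt (c :: rest) 0 =
      (if pyIsnumeric c then some (pyIntOfChar c) else wordAtB (c :: rest) itemsB) := by
  simp [matchAt]

theorem goB_eq (cs : List Char) :
    goB cs = (List.range cs.length).filterMap (matchAt cs) := by
  induction cs with
  | nil => rfl
  | cons c rest ih =>
    rw [List.length_cons, List.range_succ_eq_map, List.filterMap_cons, List.filterMap_map]
    rw [show ((matchAt (c :: rest)) ∘ Nat.succ : Nat → Option Int) = matchAt rest from by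
      funext i; exact matchAt_succ c rest i]
    rw [matchAt_zero]
    by_cases hn : pyIsnumeric c
    · simp only [goB, hn, if_true, ih, List.cons_append, List.nil_append]
    · simp only [goB, hn]
      cases hw : wordAtB (c :: rest) itemsB with
      | none => simp [ih]
      | some v => simp [ih]

theorem scanF_eq (cs : List Char) : scanF cs = (goB cs).head? := by
  induction cs with
  | nil => rfl
  | cons c rest ih =>
    simp only [scanF, goB, numeric_word, List.drop_zero, nw_eq]
    by_cases hn : pyIsnumeric c
    · simp [hn]
    · simp only [hn]
      by_cases hd : nwGo (c :: rest) wordsA 1 = -1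
      · simp [hd, ih]
      · simp [hd]

theorem scanB_eq (cs : List Char) (n : Nat) :
    scanB cs n = ((List.range n).filterMap (matchAt cs)).getLast? := by
  induction n with
  | zero => rfl
  | succ i ih =>
    rw [List.range_succ, List.filterMap_append, List.filterMap_cons, List.filterMap_nil]
    simp only [scanB, numeric_word, matchAt, List.getD_eq_getElem?_getD]
    by_cases hn : pyIsnumeric (cs[i]?.getD ' ') = true
    · rw [if_pos hn, if_pos hn, List.getLast?_concat]
    · rw [if_neg hn, if_neg hn, nw_eq]
      by_cases hd : nwGo (cs.drop i) wordsA 1 = -1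
      · rw [if_pos hd, if_neg (by simpa using hd), List.append_nil]
        exact ih
      · rw [if_neg hd, if_pos (by simpa using hd), List.getLast?_concat]

theorem wordAtB_none (s : List Char) :
    ∀ ps, wordAtB s ps = none → ∀ p ∈ ps, PySem.Chars.startswith s p.1 = false := by
  intro ps
  induction ps with
  | nil => intro _ p hp; exact absurd hp (List.not_mem_nil)
  | cons q rest ih =>
    intro h p hp
    obtain ⟨w, v⟩ := q
    simp only [wordAtB] at h
    by_cases hs : PySem.Chars.startswith s w = true
    · rw [if_pos hs] at h; exact absurd h (by simp)
    · rw [if_neg hs] at h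
      rcases List.mem_cons.mp hp with rfl | hmem
      · simpa using hs
      · exact ih h p hmem

theorem ms_ne_nil (line : String) (h : Pre_part_two_parse_line line) :
    goB line.toList ≠ [] := by
  obtain ⟨i, hi, hmatch⟩ := h
  rw [goB_eq]
  intro hnil
  have hsome : matchAt line.toList i ≠ none := by
    unfold matchAt
    simp only [List.getD_eq_getElem?_getD] at hmatch ⊢
    rcases hmatch with hd | ⟨w, hw, hpre⟩
    · simp [hd]
    · by_cases hn : pyIsnumeric (line.toList[i]?.getD ' ')
      · simp [hn]
      · rw [if_neg (by simp [hn])]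
        intro hc
        have hall := wordAtB_none (line.toList.drop i) itemsB hc
        have hwv : ∃ v, (w, v) ∈ itemsB := by
          have : w ∈ itemsB.map Prod.fst := by
            rw [show itemsB.map Prod.fst = wordsA from rfl]; exact hw
          obtain ⟨p, hp, hfst⟩ := List.mem_map.mp this
          refine ⟨p.2, ?_⟩
          rw [← hfst]
          simpa using hp
        obtain ⟨v, hv⟩ := hwv
        have := hall (w, v) hv
        rw [(PySem.Chars.startswith_iff (line.toList.drop i) w).mpr hpre] at this
        exact absurd this (by simp)
  cases hv : matchAt line.toList i with
  | none => exact hsome hv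
  | some v =>
    have hmem : v ∈ (List.range line.toList.length).filterMap (matchAt line.toList) := by
      rw [List.mem_filterMap]
      exact ⟨i, List.mem_range.mpr hi, hv⟩
    rw [hnil] at hmem
    exact List.not_mem_nil hmem

-- ===== VERDICT (by name: the statement is the Claim_ definition above) =====
theorem part_two_parse_line_spec : Claim_equal_part_two_parse_line := by
  intro line _ hpre
  unfold Spec_part_two_parse_line part_two_parse_line part_two_parse_line_alt
  have hne := ms_ne_nil line hpre
  show (scanF line.toList).getD 0 * 10 + (scanB line.toList line.toList.length).getD 0 =
    PySem.List.pyGetD (goB line.toList) 0 0 * 10 + PySem.List.pyGetD (goB line.toList) (-1) 0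
  rw [scanF_eq, scanB_eq line.toList line.toList.length, ← goB_eq,
    PySem.List.pyGetD_neg_one (goB line.toList) 0 hne, PySem.List.pyGetD_zero,
    List.getLast?_eq_some_getLast hne]
  have h1 : (goB line.toList).head?.getD 0 = (goB line.toList).getD 0 0 := by
    cases goB line.toList <;> rfl
  rw [h1]
  rfl
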